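-- pv_equiv track=rewrite | github.com/kernsuite-debian/lofar | SAS/ResourceAssignment/ResourceAssignmentEstimator/resource_estimators/observation.py | _rculist_to_bitfield
-- ===== SOURCE A (Python) =====
-- def _rculist_to_bitfield(rculist):
--     """
--     Takes list of rcus as returned by Antennasets_parser ['LBL', 'LBH', None, ...] and encodes them as a bitfield.
--     Each bit represents one rcu, value is 1 if rcu is not None in input list (= is used), 0 otherwise.
--     Returns String representation of the bitfield and the number of used rcus.
--     """
--     bitfield = ""
--     count = 0
--     for rcu in rculist:
--         if rcu is None:
--             bitfield = bitfield+"0"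
--         else:
--             bitfield = bitfield+"1"
--             count = count + 1
--
--     return bitfield, count
-- ===== SOURCE B (Python) =====
-- def _rculist_to_bitfield(rculist):
--     # Preallocate an all-ones buffer, then punch '0' holes at the None indices;
--     # the used-rcu count is total length minus the number of Nones.
--     buf = ["1"] * len(rculist)
--     for i, rcu in enumerate(rculist):
--         if rcu is None:
--             buf[i] = "0"
--     return "".join(buf), len(rculist) - rculist.count(None)
-- ===== Notes on version B (the rewrite author's own statement) =====
-- stated objective: alternative
-- what changed: Instead of A's fused accumulate-and-count string loop, B preallocates an all-'1' buffer of length n, overwrites '0' at the None indices, joins it once, and derives the count arithmetically as len(rculist) - rculist.count(None) instead of counting during the pass.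
import Mathlib
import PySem

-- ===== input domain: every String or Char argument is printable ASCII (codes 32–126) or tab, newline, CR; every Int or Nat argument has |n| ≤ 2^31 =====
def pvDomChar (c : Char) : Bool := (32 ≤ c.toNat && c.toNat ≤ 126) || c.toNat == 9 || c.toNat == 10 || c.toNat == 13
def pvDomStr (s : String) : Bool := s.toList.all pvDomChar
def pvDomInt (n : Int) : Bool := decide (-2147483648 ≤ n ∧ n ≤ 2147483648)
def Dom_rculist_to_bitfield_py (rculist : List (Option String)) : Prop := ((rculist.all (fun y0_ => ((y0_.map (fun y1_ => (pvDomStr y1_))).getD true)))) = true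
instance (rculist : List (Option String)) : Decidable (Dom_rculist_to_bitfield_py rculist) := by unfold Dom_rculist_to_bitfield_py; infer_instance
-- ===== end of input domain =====

-- B preallocates an all-"1" buffer, overwrites "0" at the None indices and joins once,
-- computing the count as length minus the number of Nones, instead of A's fused
-- accumulate-and-count string loop (alternative decomposition; return value equivalence).


-- ===== PORT A =====
-- for rcu in rculist: append "0"/"1" to bitfield and bump count when rcu is not None
def rculist_to_bitfield_py (rculist : List (Option String)) : String × Int :=
  rculist.foldl
    (fun (st : String × Int) rcu =>
      match rcu with
      | none => (st.1 ++ "0", st.2)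
      | some _ => (st.1 ++ "1", st.2 + 1))
    ("", 0)

-- ===== PORT B =====
-- buf = ["1"] * len(rculist); for i, rcu in enumerate(rculist): if rcu is None: buf[i] = "0";
-- return "".join(buf), len(rculist) - rculist.count(None)
def rculist_to_bitfield_py_alt (rculist : List (Option String)) : String × Int :=
  let buf := List.replicate rculist.length "1"
  let buf := (PySem.List.enumerate rculist).foldl
    (fun (b : List String) (p : Int × Option String) =>
      if p.2.isNone then PySem.List.pySetD b p.1 "0" else b) buf
  (PySem.Str.join "" buf, (rculist.length : Int) - (PySem.List.count rculist none : Int))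

-- ===== PRECONDITION & SPEC =====
def Spec_rculist_to_bitfield_py (rculist : List (Option String)) (out : String × Int) : Prop := out = rculist_to_bitfield_py_alt rculist
instance (rculist : List (Option String)) (out : String × Int) : Decidable (Spec_rculist_to_bitfield_py rculist out) := by unfold Spec_rculist_to_bitfield_py; infer_instance

-- ===== CLAIM (what is proved, stated in full; the proofs are below) =====
def Claim_equal_rculist_to_bitfield_py : Prop := ∀ (rculist : List (Option String)), Dom_rculist_to_bitfield_py rculist → Spec_rculist_to_bitfield_py rculist (rculist_to_bitfield_py rculist)

-- ===== LEMMAS AND PROOFS =====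

/-- The bit characters of the list. -/
def pvBits (l : List (Option String)) : List Char :=
  l.map (fun rcu => if rcu.isNone then '0' else '1')

theorem set_append_len {α : Type} (pre : List α) (a v : α) (rest : List α) :
    (pre ++ a :: rest).set pre.length v = pre ++ v :: rest := by
  induction pre with
  | nil => simp
  | cons h t ih => simp [ih]

/-- B's punch-holes loop turns the all-ones buffer into the bit strings. -/
theorem punch_invariant (l : List (Option String)) :
    ∀ (pre : List String),
      (PySem.List.enumerate l (pre.length : Int)).foldl
        (fun (b : List String) (p : Int × Option String) =>
          if p.2.isNone then PySem.List.pySetD b p.1 "0" else b)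
        (pre ++ List.replicate l.length "1")
      = pre ++ l.map (fun rcu => if rcu.isNone then "0" else "1") := by
  induction l with
  | nil => intro pre; simp [PySem.List.enumerate_nil]
  | cons x t ih =>
      intro pre
      rw [PySem.List.enumerate_cons]
      cases x with
      | none =>
          simp only [List.foldl_cons, Option.isNone_none, if_true, List.length_cons,
            List.replicate_succ]
          rw [PySem.List.pySetD_natCast, set_append_len]
          have h1 : (pre.length : Int) + 1 = (((pre ++ ["0"]).length : Nat) : Int) := by
            simp
          have h2 : pre ++ "0" :: List.replicate t.length "1"
              = (pre ++ ["0"]) ++ List.replicate t.length "1" := by simp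
          rw [h1, h2, ih (pre ++ ["0"])]
          simp
      | some v =>
          simp only [List.foldl_cons, Option.isNone_some, Bool.false_eq_true, if_false,
            List.length_cons, List.replicate_succ]
          have h1 : (pre.length : Int) + 1 = (((pre ++ ["1"]).length : Nat) : Int) := by
            simp
          have h2 : pre ++ "1" :: List.replicate t.length "1"
              = (pre ++ ["1"]) ++ List.replicate t.length "1" := by simp
          rw [h1, h2, ih (pre ++ ["1"])]
          simp

/-- Closed form of B: the bitfield string and the arithmetic count. -/
theorem altB_closed (l : List (Option String)) :
    rculist_to_bitfield_py_alt l
      = (String.ofList (pvBits l), (l.length : Int) - (l.count none : Int)) := by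
  have hbuf := punch_invariant l ([] : List String)
  simp only [List.nil_append, List.length_nil, Nat.cast_zero] at hbuf
  simp only [rculist_to_bitfield_py_alt]
  rw [hbuf]
  have hjoin : PySem.Str.join "" (l.map (fun rcu => if rcu.isNone then "0" else "1"))
      = String.ofList (pvBits l) := by
    rw [← String.toList_inj, PySem.Str.toList_join]
    have hmap : (l.map (fun rcu => if rcu.isNone then "0" else "1")).map String.toList
        = (pvBits l).map (fun ch => [ch]) := by
      simp only [List.map_map, pvBits]
      apply List.map_congr_left
      intro a _
      cases a <;> simp
    rw [hmap]
    have : ("" : String).toList = ([] : List Char) := rfl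
    rw [this, PySem.Chars.join_nil_singletons]
    simp
  rw [hjoin, PySem.List.count_eq]

/-- The number of '1' bits equals the length minus the number of Nones. -/
theorem count_ones (l : List (Option String)) :
    ((pvBits l).count '1' : Int) = (l.length : Int) - (l.count none : Int) := by
  induction l with
  | nil => simp [pvBits]
  | cons h t ih =>
      cases h with
      | none =>
          simp only [pvBits, List.map_cons, Option.isNone_none, if_true] at ih ⊢
          rw [List.count_cons_of_ne (by decide), List.count_cons_self, List.length_cons]
          push_cast
          omega
      | some v =>
          simp only [pvBits, List.map_cons, Option.isNone_some, Bool.false_eq_true,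
            if_false] at ih ⊢
          rw [List.count_cons_self, List.count_cons_of_ne (by simp), List.length_cons]
          push_cast
          omega

/-- A's fused loop, generalized over the accumulator. -/
theorem portA_invariant (l : List (Option String)) :
    ∀ (s : String) (c : Int),
      l.foldl
        (fun (st : String × Int) rcu =>
          match rcu with
          | none => (st.1 ++ "0", st.2)
          | some _ => (st.1 ++ "1", st.2 + 1)) (s, c)
      = (s ++ String.ofList (pvBits l), c + ((pvBits l).count '1' : Int)) := by
  induction l with
  | nil =>
      intro s c
      simp only [List.foldl_nil, pvBits, List.map_nil, Prod.mk.injEq]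
      constructor
      · rw [← String.toList_inj]; simp
      · simp
  | cons h t ih =>
      intro s c
      cases h with
      | none =>
          simp only [List.foldl_cons, ih (s ++ "0") c, pvBits, List.map_cons, Option.isNone_none,
            if_true, Prod.mk.injEq]
          constructor
          · rw [← String.toList_inj]; simp
          · simp
      | some v =>
          simp only [List.foldl_cons, ih (s ++ "1") (c + 1), pvBits, List.map_cons,
            Option.isNone_some, Prod.mk.injEq]
          constructor
          · rw [← String.toList_inj]; simp
          · simp
            omega

-- ===== VERDICT (by name: the statement is the Claim_ definition above) =====
theorem rculist_to_bitfield_py_spec : Claim_equal_rculist_to_bitfield_py := by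
  intro rculist _
  unfold Spec_rculist_to_bitfield_py rculist_to_bitfield_py
  rw [portA_invariant rculist "" 0, altB_closed rculist, count_ones rculist]
  simp only [Prod.mk.injEq]
  constructor
  · rw [← String.toList_inj]; simp
  · simp
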